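-- pv_equiv track=rewrite | github.com/hmit0506/intelligent-trading-dag | src/trading_dag/viz/screens/setup.py | _touch_affects_llm
-- ===== SOURCE A (Python) =====
-- LLM_PROVIDER_KEY_MAP = {
--     "openai": "OPENAI_API_KEY",
--     "groq": "GROQ_API_KEY",
--     "openrouter": "OPENROUTER_API_KEY",
--     "gemini": "GOOGLE_API_KEY",
--     "anthropic": "ANTHROPIC_API_KEY",
--     "ollama": "",
-- }
--
-- ENV_RUNTIME_MARKER_KEYS = frozenset({"ACTIVE_LLM_KEY_SOURCE"})
--
-- def _llm_cache_key_names() -> set[str]: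
--     return {v for v in LLM_PROVIDER_KEY_MAP.values() if v}
--
-- def _touch_affects_llm(names: set[str]) -> bool:
--     llm_keys = _llm_cache_key_names()
--     if names & llm_keys:
--         return True
--     return any(
--         n.endswith("_API_KEY") and n not in {"BINANCE_API_KEY"} and n not in ENV_RUNTIME_MARKER_KEYS
--         for n in names
--     )
-- ===== SOURCE B (Python) =====
-- # B: single scan, no intermediate key-set/intersection (the intersection branch is subsumed:
-- # every LLM cache key ends with "_API_KEY" and is neither excluded name).
-- def _touch_affects_llm(names: set[str]) -> bool:
--     return any(
--         n.endswith("_API_KEY") and n != "BINANCE_API_KEY"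
--         for n in names
--     )
-- ===== Notes on version B (the rewrite author's own statement) =====
-- stated objective: simpler
-- what changed: B drops A's two-pass structure (build LLM key set, intersect, then scan) and returns the answer with one scan over names, using that every LLM cache key ends with _API_KEY and the marker key does not.
import Mathlib
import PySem

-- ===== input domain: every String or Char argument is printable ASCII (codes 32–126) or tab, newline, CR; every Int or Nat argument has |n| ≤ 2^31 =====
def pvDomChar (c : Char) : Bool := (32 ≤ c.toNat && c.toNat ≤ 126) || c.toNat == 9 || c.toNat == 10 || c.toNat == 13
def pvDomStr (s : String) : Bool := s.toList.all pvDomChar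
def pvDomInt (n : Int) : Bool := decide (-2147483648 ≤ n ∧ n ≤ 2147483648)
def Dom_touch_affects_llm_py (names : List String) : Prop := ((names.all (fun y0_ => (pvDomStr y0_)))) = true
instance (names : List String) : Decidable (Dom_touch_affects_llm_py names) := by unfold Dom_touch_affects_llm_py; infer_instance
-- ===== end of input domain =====

-- B replaces A's two-pass structure (build LLM key set, intersect, then scan) with one
-- scan over names; the return value is identical (proved below). Objective: simpler.

-- ===== PORT A =====
def pvLlmProviderKeyMap : PySem.Dict String String :=
  PySem.Dict.ofList [("openai", "OPENAI_API_KEY"), ("groq", "GROQ_API_KEY"),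
   ("openrouter", "OPENROUTER_API_KEY"), ("gemini", "GOOGLE_API_KEY"),
   ("anthropic", "ANTHROPIC_API_KEY"), ("ollama", "")]

def pvEnvRuntimeMarkerKeys : PySem.Set String := PySem.Set.ofList ["ACTIVE_LLM_KEY_SOURCE"]

def llm_cache_key_names_py : PySem.Set String :=
  PySem.Set.ofList ((PySem.Dict.values pvLlmProviderKeyMap).filter (fun v => v ≠ ""))

def touch_affects_llm_py (names : List String) : Bool :=
  let llm_keys := llm_cache_key_names_py
  if PySem.Set.inter names llm_keys ≠ [] then true
  else names.any (fun n =>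
    PySem.Str.endswith n "_API_KEY"
      && !(PySem.Set.contains (PySem.Set.ofList ["BINANCE_API_KEY"]) n)
      && !(PySem.Set.contains pvEnvRuntimeMarkerKeys n))

-- ===== PORT B =====
def touch_affects_llm_py_alt (names : List String) : Bool :=
  names.any (fun n => PySem.Str.endswith n "_API_KEY" && n != "BINANCE_API_KEY")

-- ===== PRECONDITION & SPEC =====
def Spec_touch_affects_llm_py (names : List String) (out : Bool) : Prop := out = touch_affects_llm_py_alt names
instance (names : List String) (out : Bool) : Decidable (Spec_touch_affects_llm_py names out) := by unfold Spec_touch_affects_llm_py; infer_instance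

-- ===== CLAIM (what is proved, stated in full; the proofs are below) =====
def Claim_equal_touch_affects_llm_py : Prop := ∀ (names : List String), Dom_touch_affects_llm_py names → Spec_touch_affects_llm_py names (touch_affects_llm_py names)

-- ===== LEMMAS AND PROOFS =====

-- A's second-branch predicate equals B's predicate on every string: the marker key
-- "ACTIVE_LLM_KEY_SOURCE" does not end with "_API_KEY", so its exclusion is vacuous.
theorem pv_pred_eq (n : String) :
    (PySem.Str.endswith n "_API_KEY"
      && !(PySem.Set.contains (PySem.Set.ofList ["BINANCE_API_KEY"]) n)
      && !(PySem.Set.contains pvEnvRuntimeMarkerKeys n))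
    = (PySem.Str.endswith n "_API_KEY" && n != "BINANCE_API_KEY") := by
  by_cases h : n = "ACTIVE_LLM_KEY_SOURCE"
  · subst h; decide
  · simp [pvEnvRuntimeMarkerKeys, PySem.Set.ofList, PySem.Set.add, h, bne]
    congr 1

-- every LLM cache key satisfies B's predicate
theorem pv_key_pred (n : String) (h : n ∈ llm_cache_key_names_py) :
    (PySem.Str.endswith n "_API_KEY" && n != "BINANCE_API_KEY") = true := by
  have h' : n ∈ (["OPENAI_API_KEY", "GROQ_API_KEY", "OPENROUTER_API_KEY",
      "GOOGLE_API_KEY", "ANTHROPIC_API_KEY"] : List String) := by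
    rw [show llm_cache_key_names_py = _ from rfl] at h; exact h
  fin_cases h' <;> decide

-- ===== VERDICT (by name: the statement is the Claim_ definition above) =====
theorem touch_affects_llm_py_spec : Claim_equal_touch_affects_llm_py := by
  intro names _
  unfold Spec_touch_affects_llm_py touch_affects_llm_py touch_affects_llm_py_alt
  simp only
  split
  · next hne =>
    rcases List.exists_mem_of_ne_nil _ hne with ⟨n, hn⟩
    have hmem := (PySem.Set.mem_inter (s := names) (t := llm_cache_key_names_py) n).1 hn
    exact (List.any_eq_true.2 ⟨n, hmem.1, pv_key_pred n hmem.2⟩).symm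
  · exact congrArg names.any (funext pv_pred_eq)
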